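-- pv_equiv track=rewrite | github.com/grumat/glossy-msp430 | bmt/study/make_pinmap.py | align_to_col
-- ===== SOURCE A (Python) =====
-- def align_to_col(s, cols):
-- 	l = len(s)
-- 	if l < cols:
-- 		while (l < cols):
-- 			s += '\t'
-- 			l += 4
-- 			l -= l % 4
-- 	else:
-- 		s += '\t'
-- 	return s
-- ===== SOURCE B (Python) =====
-- def align_to_col(s, cols):
--     l = len(s)
--     if l < cols:
--         return s + '\t' * ((cols + 3) // 4 - l // 4)
--     return s + '\t'
-- ===== Notes on version B (the rewrite author's own statement) =====
-- stated objective: simpler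
-- what changed: Replaces the while loop that repeatedly appends a tab and rounds the column up to the next multiple of 4 with a closed-form count of tabs, (cols+3)//4 - len(s)//4, appended in one string multiplication.
import Mathlib
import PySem

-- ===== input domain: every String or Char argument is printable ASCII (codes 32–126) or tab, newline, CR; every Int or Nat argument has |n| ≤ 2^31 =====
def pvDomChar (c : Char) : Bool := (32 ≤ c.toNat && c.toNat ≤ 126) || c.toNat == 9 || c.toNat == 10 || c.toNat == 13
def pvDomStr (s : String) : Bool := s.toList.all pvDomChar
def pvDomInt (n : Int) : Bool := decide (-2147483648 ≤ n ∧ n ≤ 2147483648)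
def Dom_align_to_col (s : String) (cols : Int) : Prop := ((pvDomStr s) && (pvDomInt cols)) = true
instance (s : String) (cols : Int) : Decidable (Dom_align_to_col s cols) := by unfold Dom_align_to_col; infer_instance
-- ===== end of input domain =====

-- B replaces A's append-one-tab-at-a-time while loop with a closed-form tab count; objective: simpler.

-- ===== PORT A =====
-- the while loop: append '\t', advance l to the next multiple of 4, repeat while l < cols
def alignLoopA (cols : Int) (s : List Char) (l : Int) : List Char :=
  if h : l < cols then
    alignLoopA cols (s ++ ['\t']) (l + 4 - PySem.Int.mod (l + 4) 4)
  else s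
termination_by (cols - l).toNat
decreasing_by
  have h0 : 0 ≤ PySem.Int.mod (l + 4) 4 := PySem.Int.mod_nonneg _ (by norm_num)
  have h4 : PySem.Int.mod (l + 4) 4 < 4 := PySem.Int.mod_lt _ (by norm_num)
  omega

def align_to_col (s : String) (cols : Int) : String :=
  let l := PySem.Str.len s
  if l < cols then String.ofList (alignLoopA cols s.toList l)
  else String.ofList (s.toList ++ ['\t'])

-- ===== PORT B =====
def align_to_col_alt (s : String) (cols : Int) : String :=
  let l := PySem.Str.len s
  if l < cols then
    String.ofList (s.toList ++ List.replicate
      (PySem.Int.floordiv (cols + 3) 4 - PySem.Int.floordiv l 4).toNat '\t')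
  else String.ofList (s.toList ++ ['\t'])

-- ===== PRECONDITION & SPEC =====
def Spec_align_to_col (s : String) (cols : Int) (out : String) : Prop := out = align_to_col_alt s cols
instance (s : String) (cols : Int) (out : String) : Decidable (Spec_align_to_col s cols out) := by unfold Spec_align_to_col; infer_instance

-- ===== CLAIM (what is proved, stated in full; the proofs are below) =====
def Claim_equal_align_to_col : Prop := ∀ (s : String) (cols : Int), Dom_align_to_col s cols → Spec_align_to_col s cols (align_to_col s cols)

-- ===== LEMMAS AND PROOFS =====

lemma alignLoopA_eq (cols : Int) : ∀ (n : Nat) (l : Int) (s : List Char),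
    (cols - l).toNat = n → l < cols →
    alignLoopA cols s l =
      s ++ List.replicate (PySem.Int.floordiv (cols + 3) 4 - PySem.Int.floordiv l 4).toNat '\t' := by
  intro n
  induction n using Nat.strong_induction_on with
  | _ n ih =>
    intro l s hn hlt
    have hfd : ∀ a : Int, PySem.Int.floordiv a 4 = a / 4 := fun a =>
      PySem.Int.floordiv_eq_ediv_of_pos (by norm_num)
    have hme : PySem.Int.mod (l + 4) 4 = (l + 4) % 4 :=
      PySem.Int.mod_eq_emod_of_pos (by norm_num)
    rw [alignLoopA, dif_pos hlt]
    set l' := l + 4 - PySem.Int.mod (l + 4) 4 with hl'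
    have hl'e : l' = l + 4 - (l + 4) % 4 := by rw [hl', hme]
    by_cases h2 : l' < cols
    · have hdec : (cols - l').toNat < n := by omega
      rw [ih _ hdec l' (s ++ ['\t']) rfl h2]
      rw [List.append_assoc]
      congr 1
      have hk : (PySem.Int.floordiv (cols + 3) 4 - PySem.Int.floordiv l' 4).toNat + 1 =
          (PySem.Int.floordiv (cols + 3) 4 - PySem.Int.floordiv l 4).toNat := by
        rw [hfd, hfd, hfd]; omega
      rw [← hk, List.replicate_succ]
      rfl
    · rw [alignLoopA, dif_neg h2]
      have hk : (PySem.Int.floordiv (cols + 3) 4 - PySem.Int.floordiv l 4).toNat = 1 := by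
        rw [hfd, hfd]; omega
      rw [hk]
      rfl

-- ===== VERDICT (by name: the statement is the Claim_ definition above) =====
theorem align_to_col_spec : Claim_equal_align_to_col := by
  intro s cols _
  unfold Spec_align_to_col align_to_col align_to_col_alt
  by_cases h : PySem.Str.len s < cols
  · simp only [h, if_pos]
    rw [alignLoopA_eq cols (cols - PySem.Str.len s).toNat _ _ rfl h]
  · simp only [h, ite_false]
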